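-- pv_equiv track=rewrite | github.com/tharunm490/Smart-Cooking-Assistant | backend/recipe_generator.py | _build_extra_ingredient_strings
-- ===== SOURCE A (Python) =====
-- def _build_extra_ingredient_strings(
--
--     missing_ingredients: list[str],
--     rows: list[dict[str, str]],
-- ) -> list[str]:
--     measurement_map: dict[str, str] = {}
--     for row in rows:
--         ingredient = str(row.get("ingredient", "")).strip().lower()
--         measurement = str(row.get("measurement", "")).strip()
--         if ingredient and ingredient not in measurement_map:
--             measurement_map[ingredient] = measurement
--
--     extras: list[str] = []
--     for ingredient in missing_ingredients:
--         measurement = measurement_map.get(ingredient, "")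
--         extra_text = f"{measurement} {ingredient}".strip() if measurement else ingredient
--         if extra_text:
--             extras.append(extra_text)
--     return extras
-- ===== SOURCE B (Python) =====
-- def _build_extra_ingredient_strings(
--     missing_ingredients: list[str],
--     rows: list[dict[str, str]],
-- ) -> list[str]:
--     # Row-driven scatter: each row pushes its measurement into every still-empty
--     # slot of the positional array `meas` whose missing-ingredient name matches it.
--     meas: list[str | None] = [None] * len(missing_ingredients)
--     for row in rows:
--         ing = str(row.get("ingredient", "")).strip().lower()
--         if not ing:
--             continue
--         m = str(row.get("measurement", "")).strip()
--         for i, name in enumerate(missing_ingredients):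
--             if meas[i] is None and name == ing:
--                 meas[i] = m
--
--     extras: list[str] = []
--     for name, m in zip(missing_ingredients, meas):
--         text = f"{m} {name}".strip() if m else name
--         if text:
--             extras.append(text)
--     return extras
-- ===== Notes on version B (the rewrite author's own statement) =====
-- stated objective: alternative
-- what changed: Inverted the data flow: instead of A's name-keyed dict built from rows and then looked up per missing ingredient, B scatters row-by-row into a positional slot array aligned with missing_ingredients (filling each still-empty matching slot), then renders the strings from the slots in one zip pass.
import Mathlib
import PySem

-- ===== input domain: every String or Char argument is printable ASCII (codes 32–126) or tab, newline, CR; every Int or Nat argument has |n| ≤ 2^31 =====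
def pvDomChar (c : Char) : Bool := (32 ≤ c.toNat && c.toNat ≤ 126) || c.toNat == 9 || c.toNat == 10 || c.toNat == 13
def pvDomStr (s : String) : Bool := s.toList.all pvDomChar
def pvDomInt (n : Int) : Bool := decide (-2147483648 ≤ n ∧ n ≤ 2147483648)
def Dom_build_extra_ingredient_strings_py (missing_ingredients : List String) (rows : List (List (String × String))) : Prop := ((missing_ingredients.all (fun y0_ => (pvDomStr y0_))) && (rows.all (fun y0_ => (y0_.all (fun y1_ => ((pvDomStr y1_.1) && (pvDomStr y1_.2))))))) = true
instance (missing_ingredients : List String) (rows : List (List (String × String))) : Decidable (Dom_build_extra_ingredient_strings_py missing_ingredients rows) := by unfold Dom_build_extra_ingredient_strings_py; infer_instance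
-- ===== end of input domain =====

-- B inverts A's data flow: no name-keyed dict; rows scatter measurements into a positional
-- slot array aligned with missing_ingredients, then one zip pass renders the strings (alternative decomposition, same results).

-- shared helper: row.get(k, "") on an association-list dict (first match)
def pvRowGet (row : List (String × String)) (k : String) : String :=
  ((row.find? (fun p => p.1 == k)).map (·.2)).getD ""

-- shared helper: str(row.get("ingredient", "")).strip().lower()
def pvNorm (row : List (String × String)) : String :=
  PySem.Str.lower (PySem.Str.strip (pvRowGet row "ingredient"))

-- ===== PORT A =====
def pvStepA (d : PySem.Dict String String) (row : List (String × String)) : PySem.Dict String String :=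
  let ing := pvNorm row
  let meas := PySem.Str.strip (pvRowGet row "measurement")
  if ing ≠ "" ∧ d.contains ing = false then d.insert ing meas else d

def build_extra_ingredient_strings_py (missing_ingredients : List String) (rows : List (List (String × String))) : List String :=
  let measurement_map := rows.foldl pvStepA PySem.Dict.empty
  missing_ingredients.foldl (fun extras ingredient =>
    let measurement := measurement_map.getD ingredient ""
    let extra_text := if measurement ≠ "" then PySem.Str.strip (measurement ++ " " ++ ingredient) else ingredient
    if extra_text ≠ "" then extras ++ [extra_text] else extras) []

-- ===== PORT B =====
-- one row of B's scatter pass: fill every still-empty slot whose name matches this row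
def pvScatter (missing : List String) (meas : List (Option String)) (row : List (String × String)) : List (Option String) :=
  let ing := pvNorm row
  if ing = "" then meas
  else
    let m := PySem.Str.strip (pvRowGet row "measurement")
    (meas.zip missing).map (fun p => if p.1 = none ∧ p.2 = ing then some m else p.1)

def build_extra_ingredient_strings_py_alt (missing_ingredients : List String) (rows : List (List (String × String))) : List String :=
  let meas := rows.foldl (pvScatter missing_ingredients) (missing_ingredients.map (fun _ => (none : Option String)))
  (missing_ingredients.zip meas).foldl (fun extras p =>
    let text := match p.2 with
      | some s => if s ≠ "" then PySem.Str.strip (s ++ " " ++ p.1) else p.1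
      | none => p.1
    if text ≠ "" then extras ++ [text] else extras) []

-- ===== PRECONDITION & SPEC =====
def Spec_build_extra_ingredient_strings_py (missing_ingredients : List String) (rows : List (List (String × String))) (out : List String) : Prop := out = build_extra_ingredient_strings_py_alt missing_ingredients rows
instance (missing_ingredients : List String) (rows : List (List (String × String))) (out : List String) : Decidable (Spec_build_extra_ingredient_strings_py missing_ingredients rows out) := by unfold Spec_build_extra_ingredient_strings_py; infer_instance

-- ===== CLAIM (what is proved, stated in full; the proofs are below) =====
def Claim_equal_build_extra_ingredient_strings_py : Prop := ∀ (missing_ingredients : List String) (rows : List (List (String × String))), Dom_build_extra_ingredient_strings_py missing_ingredients rows → Spec_build_extra_ingredient_strings_py missing_ingredients rows (build_extra_ingredient_strings_py missing_ingredients rows)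

-- ===== LEMMAS AND PROOFS =====

-- first-match measurement for one missing-ingredient name, as an Option
def pvMeasOpt (rows : List (List (String × String))) (n : String) : Option String :=
  if n = "" then none
  else (rows.find? (fun row => pvNorm row == n)).map
    (fun row => PySem.Str.strip (pvRowGet row "measurement"))

-- A's dict fold never inserts the empty key
lemma fold_get?_empty_key (rows : List (List (String × String))) (d : PySem.Dict String String) :
    (rows.foldl pvStepA d).get? "" = d.get? "" := by
  induction rows generalizing d with
  | nil => rfl
  | cons row rest ih =>
    simp only [List.foldl_cons, pvStepA]
    split_ifs with h
    · rw [ih, PySem.Dict.get?_insert_of_ne _ _ (Ne.symm h.1)]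
    · exact ih d

-- A's dict lookup at a non-empty key = first-match scan of the remaining rows
lemma fold_get?_ne (rows : List (List (String × String))) (d : PySem.Dict String String)
    (k : String) (hk : k ≠ "") :
    (rows.foldl pvStepA d).get? k =
      (d.get? k).or ((rows.find? (fun row => pvNorm row == k)).map
        (fun row => PySem.Str.strip (pvRowGet row "measurement"))) := by
  induction rows generalizing d with
  | nil => simp
  | cons row rest ih =>
    by_cases hnorm : pvNorm row = k
    · rw [List.foldl_cons, List.find?_cons_of_pos (by simp [hnorm])]
      simp only [pvStepA]
      split_ifs with h
      · have hnone : d.get? k = none :=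
          (PySem.Dict.get?_eq_none_iff_contains d k).2 (hnorm ▸ h.2)
        rw [ih, hnorm]
        simp [PySem.Dict.get?_insert_self, hnone]
      · have h1 : pvNorm row ≠ "" := by rw [hnorm]; exact hk
        have h2 : ¬ d.contains (pvNorm row) = false := fun hf => h ⟨h1, hf⟩
        have hc : d.contains k = true := by
          rw [← hnorm]; revert h2; cases d.contains (pvNorm row) <;> simp
        have hsome : (d.get? k).isSome := by
          rw [← PySem.Dict.contains_eq_isSome_get?]; exact hc
        rcases Option.isSome_iff_exists.mp hsome with ⟨v, hv⟩
        rw [ih]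
        simp [hv]
    · rw [List.foldl_cons, List.find?_cons_of_neg (by simp [hnorm])]
      simp only [pvStepA]
      split_ifs with h
      · rw [ih, PySem.Dict.get?_insert_of_ne _ _ (Ne.symm hnorm)]
      · exact ih d

-- A's map lookup at any name is B's first-match measurement (Option, defaulted to "")
lemma meas_eq (rows : List (List (String × String))) (ing : String) :
    (rows.foldl pvStepA PySem.Dict.empty).getD ing "" = (pvMeasOpt rows ing).getD "" := by
  by_cases hing : ing = ""
  · subst hing
    rw [PySem.Dict.getD_eq_get?_getD, fold_get?_empty_key]
    simp [pvMeasOpt, PySem.Dict.get?_empty]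
  · rw [PySem.Dict.getD_eq_get?_getD, fold_get?_ne rows _ ing hing]
    simp only [PySem.Dict.get?_empty, Option.or, pvMeasOpt, if_neg hing]

-- scalar view of one scatter step at one slot
def pvSStep (row : List (String × String)) (n : String) (c : Option String) : Option String :=
  if pvNorm row = "" then c
  else if c = none ∧ n = pvNorm row then some (PySem.Str.strip (pvRowGet row "measurement")) else c

-- one scatter step acts slot-wise
lemma scatter_map (missing : List String) (g : String → Option String) (row : List (String × String)) :
    pvScatter missing (missing.map g) row = missing.map (fun n => pvSStep row n (g n)) := by
  by_cases h : pvNorm row = ""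
  · simp only [pvScatter, pvSStep, h]
    exact (List.map_congr_left (fun n _ => by simp)).symm
  · simp only [pvScatter, pvSStep, if_neg h]
    induction missing with
    | nil => rfl
    | cons n rest ih => simpa using ih

-- the whole scatter fold acts slot-wise
lemma fold_scatter (rows : List (List (String × String))) (missing : List String) (g : String → Option String) :
    rows.foldl (pvScatter missing) (missing.map g)
      = missing.map (fun n => rows.foldl (fun c row => pvSStep row n c) (g n)) := by
  induction rows generalizing g with
  | nil => rfl
  | cons row rest ih =>
    rw [List.foldl_cons, scatter_map missing g row, ih (fun n => pvSStep row n (g n))]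
    simp only [List.foldl_cons]

-- a filled slot never changes
lemma sfold_some (rows : List (List (String × String))) (n : String) (v : String) :
    rows.foldl (fun c row => pvSStep row n c) (some v) = some v := by
  induction rows with
  | nil => rfl
  | cons row rest ih => simpa [pvSStep] using ih

-- pvMeasOpt on a cons: matching head row
lemma measOpt_cons_pos (row : List (String × String)) (rest : List (List (String × String)))
    (n : String) (hn : n ≠ "") (hnorm : pvNorm row = n) :
    pvMeasOpt (row :: rest) n = some (PySem.Str.strip (pvRowGet row "measurement")) := by
  unfold pvMeasOpt
  rw [if_neg hn, List.find?_cons_of_pos (by simp [hnorm])]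
  rfl

-- pvMeasOpt on a cons: non-matching head row
lemma measOpt_cons_neg (row : List (String × String)) (rest : List (List (String × String)))
    (n : String) (hnorm : ¬ pvNorm row = n) :
    pvMeasOpt (row :: rest) n = pvMeasOpt rest n := by
  unfold pvMeasOpt
  by_cases hn : n = ""
  · simp [hn]
  · rw [if_neg hn, if_neg hn, List.find?_cons_of_neg (by simp [hnorm])]

-- the scalar scatter fold computes the first-match measurement
lemma sfold_none (rows : List (List (String × String))) (n : String) :
    rows.foldl (fun c row => pvSStep row n c) none = pvMeasOpt rows n := by
  induction rows with
  | nil => simp [pvMeasOpt]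
  | cons row rest ih =>
    by_cases hn : n = ""
    · subst hn
      have hstep : pvSStep row "" none = none := by
        unfold pvSStep
        by_cases h : pvNorm row = ""
        · simp [h]
        · simp [h, Ne.symm h]
      rw [List.foldl_cons, hstep, ih]
      simp [pvMeasOpt]
    · by_cases hnorm : pvNorm row = n
      · have h1 : pvNorm row ≠ "" := by rw [hnorm]; exact hn
        have hstep : pvSStep row n none = some (PySem.Str.strip (pvRowGet row "measurement")) := by
          unfold pvSStep; simp [hnorm, hn]
        rw [List.foldl_cons, hstep, sfold_some, measOpt_cons_pos row rest n hn hnorm]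
      · have hstep : pvSStep row n none = none := by
          unfold pvSStep
          by_cases h : pvNorm row = ""
          · simp [h]
          · simp [h, Ne.symm hnorm]
        rw [List.foldl_cons, hstep, ih, measOpt_cons_neg row rest n hnorm]

-- zipping a list with a map of itself
lemma zip_self_map {α β : Type} (l : List α) (f : α → β) :
    l.zip (l.map f) = l.map (fun x => (x, f x)) := by
  induction l with
  | nil => rfl
  | cons x xs ih => simp [ih]

-- ===== VERDICT (by name: the statement is the Claim_ definition above) =====
theorem build_extra_ingredient_strings_py_spec : Claim_equal_build_extra_ingredient_strings_py := by
  intro missing rows _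
  unfold Spec_build_extra_ingredient_strings_py
  unfold build_extra_ingredient_strings_py build_extra_ingredient_strings_py_alt
  rw [fold_scatter rows missing (fun _ => none)]
  simp only [sfold_none]
  rw [zip_self_map, List.foldl_map]
  simp only [meas_eq]
  congr 1
  funext extras n
  cases h : pvMeasOpt rows n with
  | none => simp
  | some s => simp
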